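-- pv_equiv track=rewrite | github.com/AntoanStefanov/softuni-education | Fundamentals/Text Processing/Text Processing - Exercise/7.String Explosion.py | string_explosion
-- ===== SOURCE A (Python) =====
-- def string_explosion(string):
--
--     total_strength = 0
--     index = 0
--     while index < len(string):
--         ch = string[index]
--         if ch == ">":
--             strength = int(string[index + 1])
--             total_strength += strength
--
--         else:
--             if total_strength > 0:
--                 string = string[:index] + string[index + 1:]
--                 total_strength -= 1
--                 continue # Защото трием символ и да не инкрементира индекса отдолу
--
--         index += 1
--
--     return string
-- ===== SOURCE B (Python) =====
-- def string_explosion(string):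
--     # one left-to-right pass: keep '>' (adding its strength), consume strength on other chars
--     out = []
--     strength = 0
--     for i, ch in enumerate(string):
--         if ch == ">":
--             out.append(ch)
--             strength += int(string[i + 1])
--         elif strength > 0:
--             strength -= 1
--         else:
--             out.append(ch)
--     return "".join(out)
-- ===== Notes on version B (the rewrite author's own statement) =====
-- stated objective: faster
-- what changed: Replaces A's in-place deletion loop (rebuilding the string by slicing on every exploded character) with a single left-to-right pass that keeps a strength counter and appends surviving characters to an output list.
-- outside the precondition, e.g. on string_explosion('>'): A raises IndexError, B raises IndexError; on string_explosion('>x'): A raises ValueError, B raises ValueError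
import Mathlib
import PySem

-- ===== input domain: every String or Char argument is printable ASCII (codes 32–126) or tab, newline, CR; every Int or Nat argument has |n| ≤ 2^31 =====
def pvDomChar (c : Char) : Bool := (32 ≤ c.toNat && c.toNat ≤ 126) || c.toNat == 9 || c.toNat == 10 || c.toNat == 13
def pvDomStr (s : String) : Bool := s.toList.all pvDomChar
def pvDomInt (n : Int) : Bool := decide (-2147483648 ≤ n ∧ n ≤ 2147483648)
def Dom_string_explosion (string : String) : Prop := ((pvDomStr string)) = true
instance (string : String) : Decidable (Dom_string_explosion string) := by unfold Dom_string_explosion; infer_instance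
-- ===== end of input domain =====

-- B is a single left-to-right pass with a strength counter instead of A's repeated
-- slice-and-reconcatenate deletions; return values agree on Pre_ (where A does not raise).

-- shared helper: int(c) for the one-character lookahead; Pre_ guarantees it is a digit
-- (outside Pre_ Python raises IndexError/ValueError; the ports default to 0 there)
def pvDigitOf (o : Option Char) : Int :=
  match o with
  | some c => (PySem.Int.ofStr? (String.mk [c])).getD 0
  | none => 0

-- ===== PORT A =====
-- while-loop of A: state = (current string, index, total_strength)
def pvALoop (s : List Char) (index : Nat) (total : Int) : List Char :=
  if h : index < s.length then
    let ch := s[index]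
    if ch = '>' then
      -- strength = int(string[index + 1])
      pvALoop s (index + 1) (total + pvDigitOf (PySem.List.pyGet? s ((index : Int) + 1)))
    else
      if total > 0 then
        -- string = string[:index] + string[index+1:]
        pvALoop (PySem.List.slice s none (some (index : Int)) ++
                 PySem.List.slice s (some ((index : Int) + 1)) none) index (total - 1)
      else
        pvALoop s (index + 1) total
  else s
termination_by s.length - index
decreasing_by
  · omega
  · have h1 : (index : Int) + 1 = ((index + 1 : Nat) : Int) := by push_cast; ring
    rw [PySem.List.slice_to_natCast, h1, PySem.List.slice_from_natCast]
    simp only [List.length_append, List.length_take, List.length_drop]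
    omega
  · omega

def string_explosion (string : String) : String :=
  String.mk (pvALoop string.toList 0 0)

-- ===== PORT B =====
-- single pass over the characters; on '>' the next original character is the lookahead
def pvBLoop : List Char → Int → List Char
  | [], _ => []
  | c :: rest, strength =>
    if c = '>' then
      c :: pvBLoop rest (strength + pvDigitOf rest.head?)
    else if strength > 0 then
      pvBLoop rest (strength - 1)
    else
      c :: pvBLoop rest strength

def string_explosion_alt (string : String) : String :=
  String.mk (pvBLoop string.toList 0)

-- ===== PRECONDITION & SPEC =====
-- Pre_ excludes exactly the inputs on which A raises: a '>' that is the last character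
-- (IndexError) or is not followed by a decimal digit (ValueError on int()).
def Pre_string_explosion (string : String) : Prop :=
  ∀ i < string.toList.length, string.toList.getD i ' ' = '>' →
    i + 1 < string.toList.length ∧ (string.toList.getD (i + 1) ' ').isDigit = true
instance (string : String) : Decidable (Pre_string_explosion string) := by
  unfold Pre_string_explosion; infer_instance

def pvWitness_string_explosion : String := ">2ab>1cd"

def Spec_string_explosion (string : String) (out : String) : Prop := out = string_explosion_alt string
instance (string : String) (out : String) : Decidable (Spec_string_explosion string out) := by unfold Spec_string_explosion; infer_instance

-- ===== CLAIM (what is proved, stated in full; the proofs are below) =====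
def Claim_equal_string_explosion : Prop := ∀ (string : String), Dom_string_explosion string → Pre_string_explosion string → Spec_string_explosion string (string_explosion string)

-- ===== LEMMAS AND PROOFS =====

-- invariant: with the kept prefix p already fixed, A's loop at index = p.length on
-- p ++ r produces p followed by what B's pass produces on r
theorem pvLoop_eq (r : List Char) : ∀ (p : List Char) (t : Int),
    pvALoop (p ++ r) p.length t = p ++ pvBLoop r t := by
  induction r with
  | nil =>
    intro p t
    rw [pvALoop]
    simp [pvBLoop]
  | cons c rest ih =>
    intro p t
    rw [pvALoop]
    have hlen : p.length < (p ++ c :: rest).length := by simp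
    have hget : (p ++ c :: rest)[p.length]'hlen = c := by simp
    rw [dif_pos hlen]
    simp only [hget]
    by_cases hc : c = '>'
    · have hla : PySem.List.pyGet? (p ++ c :: rest) ((p.length : Int) + 1) = rest.head? := by
        have h1 : (p.length : Int) + 1 = ((p.length + 1 : Nat) : Int) := by push_cast; ring
        rw [h1, PySem.List.pyGet?_natCast]
        rcases rest with _ | ⟨d, rest'⟩ <;> simp
      have hstep : pvALoop (p ++ c :: rest) (p.length + 1) (t + pvDigitOf rest.head?)
          = pvALoop ((p ++ [c]) ++ rest) (p ++ [c]).length (t + pvDigitOf rest.head?) := by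
        simp
      rw [if_pos hc, hla, hstep, ih (p ++ [c])]
      simp [pvBLoop, hc]
    · rw [if_neg hc]
      by_cases ht : t > 0
      · have hsl : PySem.List.slice (p ++ c :: rest) none (some ((p.length : Nat) : Int)) ++
            PySem.List.slice (p ++ c :: rest) (some ((p.length : Int) + 1)) none = p ++ rest := by
          have h1 : (p.length : Int) + 1 = ((p.length + 1 : Nat) : Int) := by push_cast; ring
          rw [PySem.List.slice_to_natCast, h1, PySem.List.slice_from_natCast]
          simp
        rw [if_pos ht, hsl, ih p]
        simp [pvBLoop, hc, ht]
      · have hstep : pvALoop (p ++ c :: rest) (p.length + 1) t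
            = pvALoop ((p ++ [c]) ++ rest) (p ++ [c]).length t := by simp
        rw [if_neg ht, hstep, ih (p ++ [c])]
        simp [pvBLoop, hc, ht]

-- ===== VERDICT (by name: the statement is the Claim_ definition above) =====
theorem string_explosion_spec : Claim_equal_string_explosion := by
  intro s _ _
  unfold Spec_string_explosion string_explosion string_explosion_alt
  have h := pvLoop_eq s.toList [] 0
  simp only [List.nil_append, List.length_nil] at h
  exact congrArg String.mk h
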